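-- pv_equiv track=rewrite | github.com/wisehero/programmers | level2/n^2배열자르기.py | solution
-- ===== SOURCE A (Python) =====
-- def solution(n, left, right):
--     answer = []
--     matrix = [[] for _ in range(n)]
--     for i in range(n):
--         for j in range(n):
--             matrix[i].append(max(i, j) + 1)
--
--     for i in range(n):
--         answer += matrix[i]
--
--     return answer[left:right + 1]
-- ===== SOURCE B (Python) =====
-- def solution(n, left, right):
--     if n <= 0:
--         return []
--     start, stop, _ = slice(left, right + 1).indices(n * n)
--     return [max(idx // n, idx % n) + 1 for idx in range(start, stop)]
-- ===== Notes on version B (the rewrite author's own statement) =====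
-- stated objective: faster
-- what changed: B skips building the n×n matrix entirely: it clamps the slice bounds with slice.indices and computes each requested entry directly via the closed form max(idx//n, idx%n)+1.
import Mathlib
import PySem

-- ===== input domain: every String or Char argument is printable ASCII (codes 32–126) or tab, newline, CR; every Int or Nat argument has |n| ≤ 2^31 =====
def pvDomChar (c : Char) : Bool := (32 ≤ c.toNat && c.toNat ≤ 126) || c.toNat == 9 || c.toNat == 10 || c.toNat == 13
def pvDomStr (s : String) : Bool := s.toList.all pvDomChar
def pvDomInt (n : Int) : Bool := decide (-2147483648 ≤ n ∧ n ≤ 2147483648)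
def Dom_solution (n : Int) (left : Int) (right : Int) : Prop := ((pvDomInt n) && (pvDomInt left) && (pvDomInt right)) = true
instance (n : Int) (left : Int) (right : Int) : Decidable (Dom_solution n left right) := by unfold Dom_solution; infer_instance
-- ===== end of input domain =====

-- B replaces A's O(n^2) matrix construction by the closed form max(idx//n, idx%n)+1
-- computed only for the requested slice indices (objective: faster, asymptotic).

-- ===== PORT A =====
-- literal transliteration of Source A: build the n×n matrix row by row
-- (matrix[i].append in a straight-line inner loop is ported as fetching row i,
-- appending n times, and storing it back — the same values in the same order),
-- concatenate the rows, then slice.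
def solution (n : Int) (left : Int) (right : Int) : List Int :=
  let matrix : List (List Int) := (PySem.List.pyRange 0 n 1).map (fun _ => ([] : List Int))
  let matrix := (PySem.List.pyRange 0 n 1).foldl (fun m i =>
      m.set i.toNat ((PySem.List.pyRange 0 n 1).foldl
        (fun row j => row ++ [max i j + 1]) (PySem.List.pyGetD m i []))) matrix
  let answer := (PySem.List.pyRange 0 n 1).foldl
      (fun acc i => acc ++ PySem.List.pyGetD matrix i []) []
  PySem.List.slice answer (some left) (some (right + 1))

-- ===== PORT B =====
-- literal transliteration of Source B: clamp the slice bounds (slice(...).indices = clampIdx),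
-- then map the closed form over the index range.
def solution_alt (n : Int) (left : Int) (right : Int) : List Int :=
  if n ≤ 0 then []
  else
    let total := (n * n).toNat
    let start := PySem.List.clampIdx total left
    let stop := PySem.List.clampIdx total (right + 1)
    (PySem.List.pyRange (start : Int) (stop : Int) 1).map
      (fun idx => max (PySem.Int.floordiv idx n) (PySem.Int.mod idx n) + 1)

-- ===== PRECONDITION & SPEC =====
def Spec_solution (n : Int) (left : Int) (right : Int) (out : List Int) : Prop := out = solution_alt n left right
instance (n : Int) (left : Int) (right : Int) (out : List Int) : Decidable (Spec_solution n left right out) := by unfold Spec_solution; infer_instance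

-- ===== CLAIM (what is proved, stated in full; the proofs are below) =====
def Claim_equal_solution : Prop := ∀ (n : Int) (left : Int) (right : Int), Dom_solution n left right → Spec_solution n left right (solution n left right)

-- ===== LEMMAS AND PROOFS =====

-- the closed form B computes
def pvF (n : Int) (idx : Int) : Int := max (PySem.Int.floordiv idx n) (PySem.Int.mod idx n) + 1

-- row i of A's matrix
def pvRow (n : Int) (i : Int) : List Int := (PySem.List.pyRange 0 n 1).map (fun j => max i j + 1)

-- generic: appending singletons in a fold is map
theorem pv_foldl_append_singleton {α β : Type} (g : α → β) (xs : List α) (init : List β) :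
    xs.foldl (fun acc x => acc ++ [g x]) init = init ++ xs.map g := by
  induction xs generalizing init with
  | nil => simp
  | cons x xs ih => simp [ih, List.append_assoc]

-- generic: folding (· ++ ·) is flatten
theorem pv_foldl_append_flatten {β : Type} (xs : List (List β)) (init : List β) :
    xs.foldl (fun acc r => acc ++ r) init = init ++ xs.flatten := by
  induction xs generalizing init with
  | nil => simp
  | cons x xs ih => simp [ih, List.append_assoc]

-- invariant of the matrix-building fold
theorem pv_matrix_fold (n : Int) (hn : 0 < n) :
    ((PySem.List.pyRange 0 n 1).foldl (fun m i =>
      m.set i.toNat ((PySem.List.pyRange 0 n 1).foldl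
        (fun row j => row ++ [max i j + 1]) (PySem.List.pyGetD m i [])))
      ((PySem.List.pyRange 0 n 1).map (fun _ => ([] : List Int))))
    = (List.range n.toNat).map (fun (i : Nat) => pvRow n (i : Int)) := by
  have haux : ∀ m : Nat, m ≤ n.toNat →
      (((List.range m).map (fun (k : Nat) => (k : Int))).foldl (fun m i =>
        m.set i.toNat ((PySem.List.pyRange 0 n 1).foldl
          (fun row j => row ++ [max i j + 1]) (PySem.List.pyGetD m i [])))
        ((PySem.List.pyRange 0 n 1).map (fun _ => ([] : List Int))))
      = (List.range n.toNat).map (fun i => if i < m then pvRow n (i : Int) else []) := by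
    intro m hm
    induction m with
    | zero =>
      simp [PySem.List.pyRange_one]
      apply List.ext_getElem <;> simp
    | succ m ih =>
      rw [List.range_succ, List.map_append, List.foldl_append, ih (by omega)]
      simp only [List.map_cons, List.map_nil, List.foldl_cons, List.foldl_nil]
      have hlen : ((List.range n.toNat).map (fun i => if i < m then pvRow n (i : Int) else [])).length = n.toNat := by simp
      have hget : PySem.List.pyGetD ((List.range n.toNat).map (fun i => if i < m then pvRow n (i : Int) else [])) (m : Int) [] = [] := by
        rw [PySem.List.pyGetD_eq_getElem _ _ (by positivity) (by simp; omega)]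
        simp
      rw [hget, pv_foldl_append_singleton]
      apply List.ext_getElem
      · simp
      · intro i h1 h2
        simp only [List.getElem_set]
        simp only [List.getElem_map, List.getElem_range] at *
        by_cases h : ((m : Int).toNat) = i
        · rw [if_pos h]
          rw [if_pos (by omega)]
          have hi : i = m := by omega
          subst hi
          simp [pvRow]
        · rw [if_neg h]
          by_cases h2 : i < m
          · rw [if_pos h2, if_pos (by omega)]
          · rw [if_neg h2, if_neg (by omega)]
  have := haux n.toNat le_rfl
  rw [show (PySem.List.pyRange 0 n 1) = (List.range n.toNat).map (fun (k : Nat) => (k : Int)) by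
        rw [show n = ((n.toNat : Nat) : Int) by omega]; exact PySem.List.pyRange_zero_nat n.toNat] at this ⊢
  rw [this]
  apply List.map_congr_left
  intro a ha
  rw [if_pos (List.mem_range.mp ha)]

-- the concatenation of all rows is the closed-form table
theorem pv_flatten (n : Int) (hn : 0 < n) :
    ((List.range n.toNat).map (fun (i : Nat) => pvRow n (i : Int))).flatten
    = (PySem.List.pyRange 0 (n * n) 1).map (pvF n) := by
  have haux : ∀ m : Nat, m ≤ n.toNat →
      ((List.range m).map (fun (i : Nat) => pvRow n (i : Int))).flatten
      = (PySem.List.pyRange 0 ((m * n.toNat : Nat) : Int) 1).map (pvF n) := by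
    intro m hm
    induction m with
    | zero => simp
    | succ m ih =>
      rw [List.range_succ, List.map_append, List.flatten_append, ih (by omega)]
      have hsucc : (m+1) * n.toNat = m * n.toNat + n.toNat := by ring
      rw [PySem.List.pyRange_one_append 0 ((m * n.toNat : Nat) : Int) (((m+1) * n.toNat : Nat) : Int) (by positivity) (by rw [hsucc]; push_cast; omega)]
      rw [List.map_append]
      congr 1
      rw [PySem.List.pyRange_one ((m * n.toNat : Nat) : Int)]
      have hcnt : ((((m+1) * n.toNat : Nat) : Int) - ((m * n.toNat : Nat) : Int)).toNat = n.toNat := by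
        rw [hsucc]; push_cast; omega
      rw [hcnt]
      simp only [List.map_cons, List.map_nil, List.flatten_cons, List.flatten_nil, List.append_nil]
      simp only [pvRow, List.map_map]
      rw [show (PySem.List.pyRange 0 n 1) = (List.range n.toNat).map (fun (k : Nat) => (k : Int)) by
            rw [show n = ((n.toNat : Nat) : Int) by omega]; exact PySem.List.pyRange_zero_nat n.toNat]
      rw [List.map_map]
      apply List.map_congr_left
      intro k hk
      have hk' : k < n.toNat := List.mem_range.mp hk
      simp only [Function.comp]
      have hdiv : PySem.Int.floordiv (((m * n.toNat : Nat) : Int) + (k : Int)) n = (m : Int) := by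
        rw [PySem.Int.floordiv_eq_iff_of_pos hn]
        constructor
        · push_cast; nlinarith [Int.toNat_of_nonneg (le_of_lt hn)]
        · have : ((n.toNat : Nat) : Int) = n := by omega
          push_cast [this]
          nlinarith [this]
      have hmod : PySem.Int.mod (((m * n.toNat : Nat) : Int) + (k : Int)) n = (k : Int) := by
        have h := PySem.Int.floordiv_mul_add_mod (((m * n.toNat : Nat) : Int) + (k : Int)) n
        rw [hdiv] at h
        have : ((n.toNat : Nat) : Int) = n := by omega
        push_cast [this] at h ⊢
        linarith
      simp only [pvF, hdiv, hmod]
  have := haux n.toNat le_rfl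
  rw [this]
  congr 1
  push_cast
  have : ((n.toNat : Nat) : Int) = n := by omega
  rw [this]

theorem pv_pyRange_drop (a b : Int) (k : Nat) :
    (PySem.List.pyRange a b 1).drop k = PySem.List.pyRange (a + k) b 1 := by
  apply List.ext_getElem
  · simp [PySem.List.length_pyRange_one]; omega
  · intro i h1 h2
    simp [PySem.List.getElem_pyRange_one]
    ring

theorem pv_pyRange_take (a b : Int) (k : Nat) :
    (PySem.List.pyRange a b 1).take k = PySem.List.pyRange a (min b (a + k)) 1 := by
  apply List.ext_getElem
  · simp [PySem.List.length_pyRange_one]; omega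
  · intro i h1 h2
    simp [PySem.List.getElem_pyRange_one]

-- slicing the closed-form table is the clamped range
theorem pv_slice_map (n : Int) (T : Nat) (a b : Int) :
    PySem.List.slice ((PySem.List.pyRange 0 (T : Int) 1).map (pvF n)) (some a) (some b)
    = (PySem.List.pyRange ((PySem.List.clampIdx T a : Nat) : Int) ((PySem.List.clampIdx T b : Nat) : Int) 1).map (pvF n) := by
  have hlen : ((PySem.List.pyRange 0 (T : Int) 1).map (pvF n)).length = T := by
    simp [PySem.List.length_pyRange_one]
  simp only [PySem.List.slice, hlen]
  have hsa := PySem.List.clampIdx_le T a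
  have hsb := PySem.List.clampIdx_le T b
  rw [← List.map_drop, pv_pyRange_drop, ← List.map_take, pv_pyRange_take]
  by_cases h : PySem.List.clampIdx T a ≤ PySem.List.clampIdx T b
  · have hmin : min ((T : Nat) : Int) (0 + ((PySem.List.clampIdx T a : Nat) : Int) + ((PySem.List.clampIdx T b - PySem.List.clampIdx T a : Nat) : Int)) = ((PySem.List.clampIdx T b : Nat) : Int) := by
      omega
    rw [hmin, zero_add]
  · rw [PySem.List.pyRange_one_eq_nil (by omega), PySem.List.pyRange_one_eq_nil (by omega)]

-- ===== VERDICT (by name: the statement is the Claim_ definition above) =====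
theorem solution_spec : Claim_equal_solution := by
  intro n left right _
  unfold Spec_solution solution solution_alt
  by_cases hn : n ≤ 0
  · rw [if_pos hn, PySem.List.pyRange_one_eq_nil hn]
    simp [PySem.List.slice]
  · rw [if_neg hn]
    have hn' : 0 < n := by omega
    simp only
    rw [pv_matrix_fold n hn']
    have hml : (((List.range n.toNat).map (fun (i : Nat) => pvRow n (i : Int))).length : Int) = n := by
      simp; omega
    rw [show PySem.List.pyRange 0 n 1
          = PySem.List.pyRange 0 (((List.range n.toNat).map (fun (i : Nat) => pvRow n (i : Int))).length : Int) 1 by rw [hml]]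
    rw [PySem.List.foldl_pyRange_zero_pyGetD' _ ([] : List Int) (fun acc r => acc ++ r) []]
    rw [pv_foldl_append_flatten, List.nil_append, pv_flatten n hn']
    rw [show n * n = (((n * n).toNat : Nat) : Int) by nlinarith [Int.toNat_of_nonneg (by positivity : (0:Int) ≤ n * n)]]
    rw [pv_slice_map n ((n * n).toNat) left (right + 1)]
    simp only [Int.toNat_natCast]
    rfl
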